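-- pv_equiv track=rewrite | github.com/gaohy63601-droid/NBME_CA6125 | code/postproc_5way.py | mask_to_spans
-- ===== SOURCE A (Python) =====
-- def mask_to_spans(m):
--     spans = []; i = 0; n = len(m)
--     while i < n:
--         if m[i]:
--             j = i
--             while j < n and m[j]: j += 1
--             spans.append((i, j)); i = j
--         else: i += 1
--     return spans
-- ===== SOURCE B (Python) =====
-- def mask_to_spans(m):
--     spans = []
--     start = None
--     for i, v in enumerate(m):
--         if v:
--             if start is None:
--                 start = i
--         else:
--             if start is not None:
--                 spans.append((start, i))
--                 start = None
--     if start is not None: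
--         spans.append((start, len(m)))
--     return spans
-- ===== Notes on version B (the rewrite author's own statement) =====
-- stated objective: simpler
-- what changed: Replaces the nested while-loops (outer scan plus inner run-consuming loop with manual index jumps) by one flat enumerate pass with a single 'start' state variable that detects run edges and flushes the trailing run after the loop.
import Mathlib
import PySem

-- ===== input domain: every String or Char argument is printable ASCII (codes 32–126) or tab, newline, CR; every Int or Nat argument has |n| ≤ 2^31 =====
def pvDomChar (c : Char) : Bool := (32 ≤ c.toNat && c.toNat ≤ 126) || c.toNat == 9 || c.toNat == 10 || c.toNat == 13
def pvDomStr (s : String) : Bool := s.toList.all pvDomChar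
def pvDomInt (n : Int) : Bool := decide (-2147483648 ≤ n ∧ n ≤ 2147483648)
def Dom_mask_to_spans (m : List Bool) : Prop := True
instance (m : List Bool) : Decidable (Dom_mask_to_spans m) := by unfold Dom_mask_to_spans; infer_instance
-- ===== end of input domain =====

-- B replaces A's nested while-loops by one flat pass with a 'start' state variable (simpler decomposition).

-- ===== PORT A =====
-- inner while loop 'while j < n and m[j]: j += 1': number of leading trues and the remaining suffix
def pvTakeRun : List Bool → Nat × List Bool
  | [] => (0, [])
  | true :: t => ((pvTakeRun t).1 + 1, (pvTakeRun t).2)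
  | false :: t => (0, false :: t)

theorem pvTakeRun_len (l : List Bool) : (pvTakeRun l).2.length ≤ l.length := by
  induction l with
  | nil => simp [pvTakeRun]
  | cons b t ih => cases b <;> simp [pvTakeRun] <;> omega

-- outer while loop over the suffix starting at index i
def pvGoA : List Bool → Int → List (Int × Int)
  | [], _ => []
  | false :: t, i => pvGoA t (i + 1)
  | true :: t, i =>
      (i, i + ((pvTakeRun (true :: t)).1 : Int)) ::
        pvGoA (pvTakeRun (true :: t)).2 (i + ((pvTakeRun (true :: t)).1 : Int))
termination_by l _ => l.length
decreasing_by
  · simp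
  · simpa [pvTakeRun] using Nat.lt_succ_of_le (pvTakeRun_len t)

def mask_to_spans (m : List Bool) : List (Int × Int) := pvGoA m 0

-- ===== PORT B =====
-- the for-loop over enumerate(m) with state (spans, start); on exhaustion the trailing run is flushed
def pvGoB : List Bool → Int → Option Int → List (Int × Int) → List (Int × Int)
  | [], n, start, spans =>
      match start with
      | some s => spans ++ [(s, n)]
      | none => spans
  | v :: t, i, start, spans =>
      if v then
        pvGoB t (i + 1) (match start with | none => some i | some s => some s) spans
      else
        match start with
        | some s => pvGoB t (i + 1) none (spans ++ [(s, i)])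
        | none => pvGoB t (i + 1) none spans

def mask_to_spans_alt (m : List Bool) : List (Int × Int) := pvGoB m 0 none []

-- ===== PRECONDITION & SPEC =====
def Spec_mask_to_spans (m : List Bool) (out : List (Int × Int)) : Prop := out = mask_to_spans_alt m
instance (m : List Bool) (out : List (Int × Int)) : Decidable (Spec_mask_to_spans m out) := by unfold Spec_mask_to_spans; infer_instance

-- ===== CLAIM (what is proved, stated in full; the proofs are below) =====
def Claim_equal_mask_to_spans : Prop := ∀ (m : List Bool), Dom_mask_to_spans m → Spec_mask_to_spans m (mask_to_spans m)

-- ===== LEMMAS AND PROOFS =====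

theorem pvGoB_append (m : List Bool) : ∀ (i : Int) (st : Option Int) (sp : List (Int × Int)),
    pvGoB m i st sp = sp ++ pvGoB m i st [] := by
  induction m with
  | nil => intro i st sp; cases st <;> simp [pvGoB]
  | cons v t ih =>
    intro i st sp
    cases v with
    | false =>
      cases st with
      | none =>
        simp only [pvGoB, Bool.false_eq_true, if_false]
        exact ih (i + 1) none sp
      | some s =>
        simp only [pvGoB, Bool.false_eq_true, if_false]
        rw [ih (i + 1) none (sp ++ [(s, i)]), ih (i + 1) none ([] ++ [(s, i)])]
        simp
    | true =>
      simp only [pvGoB, if_true]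
      exact ih (i + 1) _ sp

theorem pvGoB_run (m : List Bool) : ∀ (i s : Int),
    pvGoB m i (some s) [] =
      (s, i + ((pvTakeRun m).1 : Int)) :: pvGoB (pvTakeRun m).2 (i + ((pvTakeRun m).1 : Int)) none [] := by
  induction m with
  | nil => intro i s; simp [pvGoB, pvTakeRun]
  | cons v t ih =>
    intro i s
    cases v with
    | false =>
      simp only [pvGoB, pvTakeRun, Bool.false_eq_true, if_false, Nat.cast_zero, add_zero,
        List.nil_append]
      rw [pvGoB_append]
      simp
    | true =>
      simp only [pvGoB, pvTakeRun, ih (i + 1) s]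
      push_cast
      ring_nf
 
theorem pvGoA_eq_goB : ∀ (n : Nat) (m : List Bool), m.length ≤ n → ∀ (i : Int),
    pvGoA m i = pvGoB m i none [] := by
  intro n
  induction n with
  | zero =>
    intro m hm i
    have : m = [] := List.eq_nil_of_length_eq_zero (Nat.le_zero.mp hm)
    subst this; simp [pvGoA, pvGoB]
  | succ n ih =>
    intro m hm i
    match m with
    | [] => simp [pvGoA, pvGoB]
    | false :: t =>
      simp only [pvGoA, pvGoB]
      exact ih t (by simpa using Nat.lt_succ_iff.mp (Nat.lt_of_lt_of_le (by simp) hm)) (i + 1)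
    | true :: t =>
      have hlt : t.length ≤ n := by simpa using hm
      simp only [pvGoA, pvGoB, pvGoB_run]
      have hr : (pvTakeRun (true :: t)).2.length ≤ n :=
        le_trans (pvTakeRun_len t) hlt
      rw [ih _ hr]
      simp [pvTakeRun]
      push_cast
      ring_nf
      exact ⟨trivial, trivial⟩

-- ===== VERDICT (by name: the statement is the Claim_ definition above) =====
theorem mask_to_spans_spec : Claim_equal_mask_to_spans := by
  intro m _
  unfold Spec_mask_to_spans mask_to_spans mask_to_spans_alt
  exact pvGoA_eq_goB m.length m le_rfl 0
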